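-- pv_equiv track=rewrite | github.com/helenawsu/ZeroWaste-VehicleRouting | data_parser/grid_extract_debug.py | _merge_thin_rows
-- ===== SOURCE A (Python) =====
-- def _merge_thin_rows(
--     row_boundaries: list[tuple[int, int]],
--     min_height: int,
-- ) -> list[tuple[int, int]]:
--     if not row_boundaries or len(row_boundaries) <= 1:
--         return row_boundaries
--     out: list[tuple[int, int]] = []
--     i = 0
--     while i < len(row_boundaries):
--         y0, y1 = row_boundaries[i]
--         height = y1 - y0
--         while height < min_height and i + 1 < len(row_boundaries):
--             next_y0, next_y1 = row_boundaries[i + 1]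
--             y1 = next_y1
--             height = y1 - y0
--             i += 1
--         out.append((y0, y1))
--         i += 1
--     return out
-- ===== SOURCE B (Python) =====
-- def _merge_thin_rows(
--     row_boundaries: list[tuple[int, int]],
--     min_height: int,
-- ) -> list[tuple[int, int]]:
--     out: list[tuple[int, int]] = []
--     cur = None
--     for (y0, y1) in row_boundaries:
--         if cur is None:
--             cur = (y0, y1)
--         elif cur[1] - cur[0] < min_height:
--             cur = (cur[0], y1)
--         else:
--             out.append(cur)
--             cur = (y0, y1)
--     if cur is not None:
--         out.append(cur)
--     return out
-- ===== Notes on version B (the rewrite author's own statement) =====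
-- stated objective: simpler
-- what changed: Replaced the nested index-based while loops with a single for-loop fold that carries a pending interval 'cur', extending it while thin and flushing it when tall enough.
import Mathlib
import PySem

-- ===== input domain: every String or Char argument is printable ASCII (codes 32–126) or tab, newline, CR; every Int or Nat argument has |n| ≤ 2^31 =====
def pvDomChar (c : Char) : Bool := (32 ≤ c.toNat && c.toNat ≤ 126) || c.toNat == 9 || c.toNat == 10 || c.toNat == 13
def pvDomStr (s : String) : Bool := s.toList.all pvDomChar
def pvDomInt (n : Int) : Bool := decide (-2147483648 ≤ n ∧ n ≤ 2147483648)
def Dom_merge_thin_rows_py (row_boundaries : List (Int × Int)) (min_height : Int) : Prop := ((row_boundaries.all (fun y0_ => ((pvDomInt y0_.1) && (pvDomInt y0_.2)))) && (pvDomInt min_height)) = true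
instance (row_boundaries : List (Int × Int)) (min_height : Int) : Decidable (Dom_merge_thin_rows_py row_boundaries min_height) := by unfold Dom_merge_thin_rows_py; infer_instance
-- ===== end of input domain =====

-- B replaces A's nested index-based while loops by a single fold carrying a pending
-- interval (objective: simpler). Return-value equivalence on all inputs.

-- ===== PORT A =====
-- inner 'while height < min_height and i + 1 < len(...)' loop; returns (y1, i) at exit.
-- The fuel argument only bounds the iteration count (callers pass rb.length, which the
-- loop guard 'i + 1 < rb.length' keeps from ever running out); indices are in range by
-- the loop guards, so List.getD never sees its default.
def pvInnerA (rb : List (Int × Int)) (mh y0 : Int) : Nat → Int → Nat → Int × Nat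
  | 0, y1, i => (y1, i)
  | fuel + 1, y1, i =>
      if y1 - y0 < mh ∧ i + 1 < rb.length then
        pvInnerA rb mh y0 fuel (rb.getD (i + 1) (0, 0)).2 (i + 1)
      else (y1, i)

-- outer 'while i < len(row_boundaries)' loop (i strictly increases, so fuel rb.length suffices)
def pvOuterA (rb : List (Int × Int)) (mh : Int) : Nat → Nat → List (Int × Int)
  | 0, _ => []
  | fuel + 1, i =>
      if i < rb.length then
        let p := rb.getD i (0, 0)
        let r := pvInnerA rb mh p.1 rb.length p.2 i
        (p.1, r.1) :: pvOuterA rb mh fuel (r.2 + 1)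
      else []

def merge_thin_rows_py (row_boundaries : List (Int × Int)) (min_height : Int) : List (Int × Int) :=
  if row_boundaries = [] ∨ row_boundaries.length ≤ 1 then row_boundaries
  else pvOuterA row_boundaries min_height row_boundaries.length 0

-- ===== PORT B =====
-- the for-loop body of Source B: state = (out, cur)
def pvStepB (mh : Int) (st : List (Int × Int) × Option (Int × Int)) (p : Int × Int) :
    List (Int × Int) × Option (Int × Int) :=
  match st.2 with
  | none => (st.1, some p)
  | some c =>
      if c.2 - c.1 < mh then (st.1, some (c.1, p.2))
      else (st.1 ++ [c], some p)

def merge_thin_rows_py_alt (row_boundaries : List (Int × Int)) (min_height : Int) : List (Int × Int) :=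
  let s := row_boundaries.foldl (pvStepB min_height) ([], none)
  match s.2 with
  | none => s.1
  | some c => s.1 ++ [c]

-- ===== PRECONDITION & SPEC =====
def Spec_merge_thin_rows_py (row_boundaries : List (Int × Int)) (min_height : Int) (out : List (Int × Int)) : Prop := out = merge_thin_rows_py_alt row_boundaries min_height
instance (row_boundaries : List (Int × Int)) (min_height : Int) (out : List (Int × Int)) : Decidable (Spec_merge_thin_rows_py row_boundaries min_height out) := by unfold Spec_merge_thin_rows_py; infer_instance

-- ===== CLAIM (what is proved, stated in full; the proofs are below) =====
def Claim_equal_merge_thin_rows_py : Prop := ∀ (row_boundaries : List (Int × Int)) (min_height : Int), Dom_merge_thin_rows_py row_boundaries min_height → Spec_merge_thin_rows_py row_boundaries min_height (merge_thin_rows_py row_boundaries min_height)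

-- ===== LEMMAS AND PROOFS =====

-- proof-side characterisation of B: merge starting from a pending interval c
def pvGo (mh : Int) (c : Int × Int) : List (Int × Int) → List (Int × Int)
  | [] => [c]
  | p :: rest =>
      if c.2 - c.1 < mh then pvGo mh (c.1, p.2) rest
      else c :: pvGo mh p rest

theorem pvFoldB_go (mh : Int) (l : List (Int × Int)) : ∀ (out : List (Int × Int)) (c : Int × Int),
    (match (l.foldl (pvStepB mh) (out, some c)).2 with
     | none => (l.foldl (pvStepB mh) (out, some c)).1
     | some d => (l.foldl (pvStepB mh) (out, some c)).1 ++ [d]) = out ++ pvGo mh c l := by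
  induction l with
  | nil => intro out c; simp [pvGo]
  | cons p rest ih =>
      intro out c
      by_cases h : c.2 - c.1 < mh
      · simp only [List.foldl_cons, pvStepB, if_pos h, pvGo, ih]
      · simp only [List.foldl_cons, pvStepB, if_neg h, pvGo, ih, List.append_assoc,
          List.singleton_append]

theorem pvAlt_go (mh : Int) (p : Int × Int) (rest : List (Int × Int)) :
    merge_thin_rows_py_alt (p :: rest) mh = pvGo mh p rest := by
  have := pvFoldB_go mh rest [] p
  simpa [merge_thin_rows_py_alt, pvStepB] using this

-- the key correspondence for A: an in-flight outer iteration equals pvGo on the suffix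
-- (the fuel hypotheses say each loop has at least as much fuel as remaining iterations)
theorem pvA_go (rb : List (Int × Int)) (mh : Int) : ∀ (n i fi fo : Nat) (y0 y1 : Int),
    rb.length - i = n → i < rb.length →
    rb.length ≤ fi + i + 1 → rb.length ≤ fo + i + 1 →
    (y0, (pvInnerA rb mh y0 fi y1 i).1) :: pvOuterA rb mh fo ((pvInnerA rb mh y0 fi y1 i).2 + 1)
      = pvGo mh (y0, y1) (rb.drop (i + 1)) := by
  intro n
  induction n with
  | zero => intro i fi fo y0 y1 hn hi _ _; omega
  | succ n ih =>
    intro i fi fo y0 y1 hn hi hfi hfo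
    by_cases hnext : i + 1 < rb.length
    · have hdrop : rb.drop (i + 1) = rb.getD (i + 1) (0, 0) :: rb.drop (i + 1 + 1) := by
        rw [List.drop_eq_getElem_cons hnext, List.getD_eq_getElem _ _ hnext]
      obtain ⟨fi', rfl⟩ : ∃ fi', fi = fi' + 1 := ⟨fi - 1, by omega⟩
      obtain ⟨fo', rfl⟩ : ∃ fo', fo = fo' + 1 := ⟨fo - 1, by omega⟩
      by_cases hthin : y1 - y0 < mh
      · rw [pvInnerA, if_pos ⟨hthin, hnext⟩, hdrop, pvGo, if_pos hthin]
        exact ih (i + 1) fi' (fo' + 1) y0 (rb.getD (i + 1) (0, 0)).2 (by omega) hnext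
          (by omega) (by omega)
      · rw [pvInnerA, if_neg (by tauto), hdrop, pvGo, if_neg hthin]
        rw [pvOuterA, if_pos hnext]
        have := ih (i + 1) rb.length fo' (rb.getD (i + 1) (0, 0)).1 (rb.getD (i + 1) (0, 0)).2
          (by omega) hnext (by omega) (by omega)
        simp only at this ⊢
        rw [this]
    · have hdrop : rb.drop (i + 1) = [] := List.drop_eq_nil_of_le (by omega)
      have hinner : pvInnerA rb mh y0 fi y1 i = (y1, i) := by
        cases fi with
        | zero => rfl
        | succ f => rw [pvInnerA, if_neg (by tauto)]
      rw [hinner, hdrop, pvGo]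
      cases fo with
      | zero => rfl
      | succ f => rw [pvOuterA, if_neg (by omega)]

-- ===== VERDICT (by name: the statement is the Claim_ definition above) =====
theorem merge_thin_rows_py_spec : Claim_equal_merge_thin_rows_py := by
  intro rb mh _
  unfold Spec_merge_thin_rows_py
  match rb with
  | [] => rfl
  | [p] =>
      simp [merge_thin_rows_py, merge_thin_rows_py_alt, pvStepB]
  | p :: q :: rest =>
      rw [pvAlt_go]
      have hlen : 0 < (p :: q :: rest).length := by simp
      rw [merge_thin_rows_py, if_neg (by simp)]
      have hfuel : (p :: q :: rest).length = rest.length + 1 + 1 := by simp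
      rw [hfuel, pvOuterA, if_pos (by simp)]
      have := pvA_go (p :: q :: rest) mh (p :: q :: rest).length 0 (p :: q :: rest).length
        (rest.length + 1) p.1 p.2 rfl hlen (by simp) (by simp)
      simp only [List.getD, hfuel] at this ⊢
      simpa using this
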